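-- pv_equiv track=rewrite | github.com/thomasjallerton/ultimate-tic-tac-toe | ultimatetictactoe.py | get_danger_squares
-- ===== SOURCE A (Python) =====
-- X_PIECE = "X"
--
-- O_PIECE = "O"
--
-- def get_danger_squares(board, piece):
--     opponent = swap_turn(piece)
--     squares = []
--
--     # find danger in rows
--     for iter_row in range(3):
--         for iter_col in range(3):
--             if board[iter_row][iter_col % 3] == opponent \
--                     and board[iter_row][(iter_col + 1) % 3] == opponent:
--                 squares.append([iter_row, (iter_col + 2) % 3])
--
--     # find danger in columns
--     for iter_col in range(3):
--         for iter_row in range(3):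
--             if board[iter_row % 3][iter_col] == opponent \
--                     and board[(iter_row + 1) % 3][iter_col] == opponent:
--                 squares.append([(iter_row + 2) % 3, iter_col])
--
--     # find danger in top left to bottom right diagonal
--     for existing in range(3):
--         other_existing = (existing + 1) % 3
--         danger_move = (existing + 2) % 3
--         if board[existing][existing] == opponent and board[other_existing][other_existing] == opponent:
--             squares.append([danger_move, danger_move])
--
--     # find danger in bottom left to top right diagonal
--     if board[2][0] == opponent and board[1][1] == opponent:
--         squares.append([0, 2])
--     if board[0][2] == opponent and board[2][2] == opponent:
--         squares.append([1, 1])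
--     if board[1][1] == opponent and board[0][2] == opponent:
--         squares.append([2, 0])
--
--     return squares
--
-- def swap_turn(piece):
--     if piece == X_PIECE:
--         return O_PIECE
--     else:
--         return X_PIECE
-- ===== SOURCE B (Python) =====
-- X_PIECE = "X"
--
-- O_PIECE = "O"
--
--
-- def swap_turn(piece):
--     if piece == X_PIECE:
--         return O_PIECE
--     else:
--         return X_PIECE
--
--
-- # Uniform line-rotation algorithm: build the 8 winning lines (3 rows, 3
-- # columns, both diagonals) and, for every rotation of each line, append the
-- # third cell when the other two hold the opponent.  This treats the
-- # anti-diagonal like every other line, fixing A's hardcoded (2,2) typo there.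
-- def get_danger_squares(board, piece):
--     opponent = swap_turn(piece)
--     lines = [[(i, 0), (i, 1), (i, 2)] for i in range(3)]
--     lines += [[(0, j), (1, j), (2, j)] for j in range(3)]
--     lines.append([(0, 0), (1, 1), (2, 2)])
--     lines.append([(2, 0), (1, 1), (0, 2)])
--     squares = []
--     for line in lines:
--         for k in range(3):
--             a, b = line[k]
--             c, d = line[(k + 1) % 3]
--             e, f = line[(k + 2) % 3]
--             if board[a][b] == opponent and board[c][d] == opponent:
--                 squares.append([e, f])
--     return squares
-- ===== Notes on version B (the rewrite author's own statement) =====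
-- stated objective: alternative
-- what changed: Replaces A's four hardcoded loop/if blocks with a uniform algorithm that builds the 8 winning lines and scans every rotation of each line, treating the anti-diagonal like every other line instead of three hand-written ifs.
-- intended difference: On boards where the opponent holds (0,2) together with (2,2), (2,0) or (1,1), A's hand-written anti-diagonal block fires accidentally (it tests (2,2) instead of (2,0) for the (1,1) danger square and appends [1,1] before [2,0]), while B reports the anti-diagonal's real danger squares in uniform rotation order, which is the intended behaviour. — e.g. on get_danger_squares([["", "", "O"], ["", "", ""], ["", "", "O"]], "X"): A returns [[1, 2], [1, 1]], B returns [[1, 2]]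
import Mathlib
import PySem

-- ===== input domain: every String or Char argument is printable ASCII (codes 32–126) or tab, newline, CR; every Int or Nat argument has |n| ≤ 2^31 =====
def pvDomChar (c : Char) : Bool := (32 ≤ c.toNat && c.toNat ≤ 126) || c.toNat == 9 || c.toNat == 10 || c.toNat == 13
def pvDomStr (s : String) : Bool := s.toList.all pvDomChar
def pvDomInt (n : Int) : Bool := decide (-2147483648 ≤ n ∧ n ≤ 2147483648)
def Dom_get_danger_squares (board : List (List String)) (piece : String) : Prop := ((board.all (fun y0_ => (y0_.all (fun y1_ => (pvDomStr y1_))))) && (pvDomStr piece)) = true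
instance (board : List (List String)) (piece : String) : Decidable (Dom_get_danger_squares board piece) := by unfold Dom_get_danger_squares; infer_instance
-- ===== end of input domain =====

-- B replaces A's four hand-written blocks by one uniform pass over the 8
-- winning lines, scanning every rotation of every line; it therefore fixes
-- A's anti-diagonal typo (see D_ below) and is otherwise identical in output.

-- board[r][c]; inside Pre_ every access is in range, so the defaults never fire
def pvCell (board : List (List String)) (r c : Int) : String :=
  PySem.List.pyGetD (PySem.List.pyGetD board r []) c ""

def pvSwapTurn (piece : String) : String :=
  if piece == "X" then "O" else "X"

-- ===== PORT A =====
def get_danger_squares (board : List (List String)) (piece : String) : List (List Int) :=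
  let opponent := pvSwapTurn piece
  let squares : List (List Int) := []
  -- find danger in rows
  let squares := (PySem.List.pyRange 0 3 1).foldl (fun squares iter_row =>
    (PySem.List.pyRange 0 3 1).foldl (fun squares iter_col =>
      if pvCell board iter_row (PySem.Int.mod iter_col 3) == opponent
          && pvCell board iter_row (PySem.Int.mod (iter_col + 1) 3) == opponent then
        squares ++ [[iter_row, PySem.Int.mod (iter_col + 2) 3]]
      else squares) squares) squares
  -- find danger in columns
  let squares := (PySem.List.pyRange 0 3 1).foldl (fun squares iter_col =>
    (PySem.List.pyRange 0 3 1).foldl (fun squares iter_row =>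
      if pvCell board (PySem.Int.mod iter_row 3) iter_col == opponent
          && pvCell board (PySem.Int.mod (iter_row + 1) 3) iter_col == opponent then
        squares ++ [[PySem.Int.mod (iter_row + 2) 3, iter_col]]
      else squares) squares) squares
  -- find danger in top left to bottom right diagonal
  let squares := (PySem.List.pyRange 0 3 1).foldl (fun squares existing =>
    let other_existing := PySem.Int.mod (existing + 1) 3
    let danger_move := PySem.Int.mod (existing + 2) 3
    if pvCell board existing existing == opponent
        && pvCell board other_existing other_existing == opponent then
      squares ++ [[danger_move, danger_move]]
    else squares) squares
  -- find danger in bottom left to top right diagonal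
  let squares := if pvCell board 2 0 == opponent && pvCell board 1 1 == opponent then
      squares ++ [[(0 : Int), 2]] else squares
  let squares := if pvCell board 0 2 == opponent && pvCell board 2 2 == opponent then
      squares ++ [[(1 : Int), 1]] else squares
  let squares := if pvCell board 1 1 == opponent && pvCell board 0 2 == opponent then
      squares ++ [[(2 : Int), 0]] else squares
  squares

-- ===== PORT B =====
def get_danger_squares_alt (board : List (List String)) (piece : String) : List (List Int) :=
  let opponent := pvSwapTurn piece
  let lines : List (List (Int × Int)) :=
    (PySem.List.pyRange 0 3 1).map (fun i => [(i, 0), (i, 1), (i, 2)])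
      ++ (PySem.List.pyRange 0 3 1).map (fun j => [(0, j), (1, j), (2, j)])
      ++ [[(0, 0), (1, 1), (2, 2)]]
      ++ [[(2, 0), (1, 1), (0, 2)]]
  lines.foldl (fun squares line =>
    (PySem.List.pyRange 0 3 1).foldl (fun squares k =>
      let ab := PySem.List.pyGetD line k (0, 0)
      let cd := PySem.List.pyGetD line (PySem.Int.mod (k + 1) 3) (0, 0)
      let ef := PySem.List.pyGetD line (PySem.Int.mod (k + 2) 3) (0, 0)
      if pvCell board ab.1 ab.2 == opponent && pvCell board cd.1 cd.2 == opponent then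
        squares ++ [[ef.1, ef.2]]
      else squares) squares) []

-- ===== PRECONDITION & SPEC =====
-- Pre_ excludes boards with fewer than 3 rows or with one of the first three
-- rows shorter than 3 cells: there Python A raises IndexError (and so does B).
def Pre_get_danger_squares (board : List (List String)) (piece : String) : Prop :=
  3 ≤ board.length ∧ ∀ row ∈ board.take 3, 3 ≤ row.length
instance (board : List (List String)) (piece : String) : Decidable (Pre_get_danger_squares board piece) := by unfold Pre_get_danger_squares; infer_instance

def pvWitness_get_danger_squares : List (List String) × String :=
  ([["X", "O", ""], ["", "O", ""], ["X", "", "O"]], "X")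

-- On boards where the opponent holds (0,2) together with (2,2), (2,0) or (1,1),
-- A's hand-written anti-diagonal block fires accidentally (it tests (2,2)
-- instead of (2,0) for the (1,1) danger square, and appends [1,1] before
-- [2,0]); B reports the anti-diagonal's real danger squares in uniform
-- rotation order, the intended behaviour.
def D_get_danger_squares (board : List (List String)) (piece : String) : Prop :=
  let o := pvSwapTurn piece
  let c20 := pvCell board 2 0 == o
  let c11 := pvCell board 1 1 == o
  let c02 := pvCell board 0 2 == o
  let c22 := pvCell board 2 2 == o
  ((c11 && c02) && ((c02 && c22) || (c02 && c20))
    || (!(c11 && c02)) && !((c02 && c22) == (c02 && c20))) = true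
instance (board : List (List String)) (piece : String) : Decidable (D_get_danger_squares board piece) := by unfold D_get_danger_squares; infer_instance

def Spec_get_danger_squares (board : List (List String)) (piece : String) (out : List (List Int)) : Prop := ¬ D_get_danger_squares board piece → out = get_danger_squares_alt board piece
instance (board : List (List String)) (piece : String) (out : List (List Int)) : Decidable (Spec_get_danger_squares board piece out) := by unfold Spec_get_danger_squares; infer_instance

def pvDiffWitness_get_danger_squares : List (List String) × String :=
  ([["", "", "O"], ["", "", ""], ["", "", "O"]], "X")
def pvDiffWitnessOut_get_danger_squares : (List (List Int)) × (List (List Int)) :=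
  ([[1, 2], [1, 1]], [[1, 2]])

-- ===== CLAIM (what is proved, stated in full; the proofs are below) =====
def Claim_unchanged_get_danger_squares : Prop := ∀ (board : List (List String)) (piece : String), Dom_get_danger_squares board piece → Pre_get_danger_squares board piece → Spec_get_danger_squares board piece (get_danger_squares board piece)
def Claim_changed_get_danger_squares : Prop := Dom_get_danger_squares (pvDiffWitness_get_danger_squares.1) (pvDiffWitness_get_danger_squares.2) ∧ Pre_get_danger_squares (pvDiffWitness_get_danger_squares.1) (pvDiffWitness_get_danger_squares.2) ∧ D_get_danger_squares (pvDiffWitness_get_danger_squares.1) (pvDiffWitness_get_danger_squares.2) ∧ get_danger_squares (pvDiffWitness_get_danger_squares.1) (pvDiffWitness_get_danger_squares.2) = pvDiffWitnessOut_get_danger_squares.1 ∧ get_danger_squares_alt (pvDiffWitness_get_danger_squares.1) (pvDiffWitness_get_danger_squares.2) = pvDiffWitnessOut_get_danger_squares.2 ∧ pvDiffWitnessOut_get_danger_squares.1 ≠ pvDiffWitnessOut_get_danger_squares.2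
def Claim_exact_get_danger_squares : Prop := ∀ (board : List (List String)) (piece : String), Dom_get_danger_squares board piece → Pre_get_danger_squares board piece → D_get_danger_squares board piece → get_danger_squares board piece ≠ get_danger_squares_alt board piece

-- ===== LEMMAS AND PROOFS =====
lemma pvRange3 : PySem.List.pyRange 0 3 1 = [0, 1, 2] := by decide
lemma pvMod0 : PySem.Int.mod 0 3 = 0 := by decide
lemma pvMod1 : PySem.Int.mod 1 3 = 1 := by decide
lemma pvMod2 : PySem.Int.mod 2 3 = 2 := by decide
lemma pvMod3 : PySem.Int.mod 3 3 = 0 := by decide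
lemma pvMod4 : PySem.Int.mod 4 3 = 1 := by decide

-- pyGetD on a 3-element literal line, at the three indices B uses
lemma pvGetD0 (x y z w : Int × Int) : PySem.List.pyGetD [x, y, z] 0 w = x := by rfl
lemma pvGetD1 (x y z w : Int × Int) : PySem.List.pyGetD [x, y, z] 1 w = y := by rfl
lemma pvGetD2 (x y z w : Int × Int) : PySem.List.pyGetD [x, y, z] 2 w = z := by rfl

-- turn one conditional append into an append of a conditional singleton
lemma pvIfAppend (c : Bool) (s : List (List Int)) (x : List Int) :
    (if c = true then s ++ [x] else s) = s ++ (if c = true then [x] else []) := by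
  cases c <;> simp

-- the 21 checks both programs perform identically, in their shared order
def pvPre (board : List (List String)) (o : String) : List (List Int) :=
  (if pvCell board 0 0 == o && pvCell board 0 1 == o then [[(0:Int), 2]] else [])
  ++ (if pvCell board 0 1 == o && pvCell board 0 2 == o then [[(0:Int), 0]] else [])
  ++ (if pvCell board 0 2 == o && pvCell board 0 0 == o then [[(0:Int), 1]] else [])
  ++ (if pvCell board 1 0 == o && pvCell board 1 1 == o then [[(1:Int), 2]] else [])
  ++ (if pvCell board 1 1 == o && pvCell board 1 2 == o then [[(1:Int), 0]] else [])
  ++ (if pvCell board 1 2 == o && pvCell board 1 0 == o then [[(1:Int), 1]] else [])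
  ++ (if pvCell board 2 0 == o && pvCell board 2 1 == o then [[(2:Int), 2]] else [])
  ++ (if pvCell board 2 1 == o && pvCell board 2 2 == o then [[(2:Int), 0]] else [])
  ++ (if pvCell board 2 2 == o && pvCell board 2 0 == o then [[(2:Int), 1]] else [])
  ++ (if pvCell board 0 0 == o && pvCell board 1 0 == o then [[(2:Int), 0]] else [])
  ++ (if pvCell board 1 0 == o && pvCell board 2 0 == o then [[(0:Int), 0]] else [])
  ++ (if pvCell board 2 0 == o && pvCell board 0 0 == o then [[(1:Int), 0]] else [])
  ++ (if pvCell board 0 1 == o && pvCell board 1 1 == o then [[(2:Int), 1]] else [])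
  ++ (if pvCell board 1 1 == o && pvCell board 2 1 == o then [[(0:Int), 1]] else [])
  ++ (if pvCell board 2 1 == o && pvCell board 0 1 == o then [[(1:Int), 1]] else [])
  ++ (if pvCell board 0 2 == o && pvCell board 1 2 == o then [[(2:Int), 2]] else [])
  ++ (if pvCell board 1 2 == o && pvCell board 2 2 == o then [[(0:Int), 2]] else [])
  ++ (if pvCell board 2 2 == o && pvCell board 0 2 == o then [[(1:Int), 2]] else [])
  ++ (if pvCell board 0 0 == o && pvCell board 1 1 == o then [[(2:Int), 2]] else [])
  ++ (if pvCell board 1 1 == o && pvCell board 2 2 == o then [[(0:Int), 0]] else [])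
  ++ (if pvCell board 2 2 == o && pvCell board 0 0 == o then [[(1:Int), 1]] else [])
  ++ (if pvCell board 2 0 == o && pvCell board 1 1 == o then [[(0:Int), 2]] else [])

lemma pvA_norm (board : List (List String)) (piece : String) :
    get_danger_squares board piece =
      pvPre board (pvSwapTurn piece)
      ++ (if pvCell board 0 2 == pvSwapTurn piece && pvCell board 2 2 == pvSwapTurn piece then [[(1:Int), 1]] else [])
      ++ (if pvCell board 1 1 == pvSwapTurn piece && pvCell board 0 2 == pvSwapTurn piece then [[(2:Int), 0]] else []) := by
  simp only [get_danger_squares, pvRange3, List.foldl_cons, List.foldl_nil,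
    Int.reduceAdd, pvMod0, pvMod1, pvMod2, pvMod3, pvMod4, pvIfAppend]
  simp only [pvPre, List.append_assoc, List.nil_append]

lemma pvB_norm (board : List (List String)) (piece : String) :
    get_danger_squares_alt board piece =
      pvPre board (pvSwapTurn piece)
      ++ (if pvCell board 1 1 == pvSwapTurn piece && pvCell board 0 2 == pvSwapTurn piece then [[(2:Int), 0]] else [])
      ++ (if pvCell board 0 2 == pvSwapTurn piece && pvCell board 2 0 == pvSwapTurn piece then [[(1:Int), 1]] else []) := by
  simp only [get_danger_squares_alt, pvRange3, List.map_cons, List.map_nil,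
    List.cons_append, List.nil_append, List.foldl_cons, List.foldl_nil,
    Int.reduceAdd, pvMod1, pvMod2, pvMod3, pvMod4, pvGetD0, pvGetD1, pvGetD2, pvIfAppend]
  simp only [pvPre, List.append_assoc]

-- ===== VERDICT (by name: the statements are the Claim_ definitions above) =====
theorem get_danger_squares_spec : Claim_unchanged_get_danger_squares := by
  intro board piece _ _ hD
  rw [pvA_norm, pvB_norm]
  unfold D_get_danger_squares at hD
  rcases hb20 : (pvCell board 2 0 == pvSwapTurn piece) <;>
    rcases hb11 : (pvCell board 1 1 == pvSwapTurn piece) <;>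
    rcases hb02 : (pvCell board 0 2 == pvSwapTurn piece) <;>
    rcases hb22 : (pvCell board 2 2 == pvSwapTurn piece) <;>
    simp_all

theorem get_danger_squares_changed : Claim_changed_get_danger_squares := by
  unfold Claim_changed_get_danger_squares; decide

theorem get_danger_squares_tight : Claim_exact_get_danger_squares := by
  intro board piece _ _ hD
  rw [pvA_norm, pvB_norm, List.append_assoc, List.append_assoc]
  intro h
  have h' := List.append_cancel_left h
  unfold D_get_danger_squares at hD
  rcases hb20 : (pvCell board 2 0 == pvSwapTurn piece) <;>
    rcases hb11 : (pvCell board 1 1 == pvSwapTurn piece) <;>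
    rcases hb02 : (pvCell board 0 2 == pvSwapTurn piece) <;>
    rcases hb22 : (pvCell board 2 2 == pvSwapTurn piece) <;>
    simp_all
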